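-- pv_equiv track=rewrite | github.com/alias-pyking/InterviewPrep | EPI/sinusoidal_string.py | sinusoidal_string
-- ===== SOURCE A (Python) =====
-- def  sinusoidal_string(string):
--     res = []
--     for i in range(1,len(string),4):
--         res.append(string[i])
--     for i in range(0,len(string),2):
--         res.append(string[i])
--     for i in range(3,len(string),4):
--         res.append(string[i])
--     return ''.join(res)
-- ===== SOURCE B (Python) =====
-- def sinusoidal_string(string):
--     one, two, three = [], [], []
--     for i, ch in enumerate(string):
--         if i % 4 == 1:
--             one.append(ch)
--         elif i % 2 == 0:
--             two.append(ch)
--         elif i % 4 == 3: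
--             three.append(ch)
--     return ''.join(one + two + three)
-- ===== Notes on version B (the rewrite author's own statement) =====
-- stated objective: alternative
-- what changed: Replaces A's three separate range scans over the string (each re-indexing string[i]) with a single enumerate pass that bucketizes each character into one of three lists by index residue, then concatenates the buckets.
import Mathlib
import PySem

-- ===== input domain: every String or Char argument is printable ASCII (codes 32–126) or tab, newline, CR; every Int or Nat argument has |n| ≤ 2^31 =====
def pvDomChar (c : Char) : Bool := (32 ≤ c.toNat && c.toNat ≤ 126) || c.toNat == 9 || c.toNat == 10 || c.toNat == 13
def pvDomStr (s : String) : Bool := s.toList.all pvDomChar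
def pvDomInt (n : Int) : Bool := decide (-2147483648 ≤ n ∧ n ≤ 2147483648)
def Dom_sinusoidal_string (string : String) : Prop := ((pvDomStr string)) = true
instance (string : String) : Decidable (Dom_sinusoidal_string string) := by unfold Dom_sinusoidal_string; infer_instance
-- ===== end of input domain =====

-- B replaces A's three range scans by one bucketizing pass over enumerate; equivalence of return values proved.

-- ===== PORT A =====
-- A indexes string[i] only with 0 ≤ i < len(string), so pyGetD is exact here (the default is never used).
def sinusoidal_string (string : String) : String :=
  let cs : List Char := string.toList
  let n : Int := (cs.length : Int)
  let res : List Char := (PySem.List.pyRange 1 n 4).foldl (fun acc i => acc ++ [PySem.List.pyGetD cs i ' ']) []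
  let res := (PySem.List.pyRange 0 n 2).foldl (fun acc i => acc ++ [PySem.List.pyGetD cs i ' ']) res
  let res := (PySem.List.pyRange 3 n 4).foldl (fun acc i => acc ++ [PySem.List.pyGetD cs i ' ']) res
  String.ofList res

-- ===== PORT B =====
-- the loop body of Source B: bucketize (i, ch) into (one, two, three) by index residue
def pvBStep (st : List Char × List Char × List Char) (p : Int × Char) :
    List Char × List Char × List Char :=
  if p.1 % 4 = 1 then (st.1 ++ [p.2], st.2.1, st.2.2)
  else if p.1 % 2 = 0 then (st.1, st.2.1 ++ [p.2], st.2.2)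
  else if p.1 % 4 = 3 then (st.1, st.2.1, st.2.2 ++ [p.2])
  else st

def sinusoidal_string_alt (string : String) : String :=
  let cs : List Char := string.toList
  let st := (PySem.List.enumerate cs 0).foldl pvBStep ([], [], [])
  String.ofList (st.1 ++ (st.2.1 ++ st.2.2))

-- ===== PRECONDITION & SPEC =====
def Spec_sinusoidal_string (string : String) (out : String) : Prop := out = sinusoidal_string_alt string
instance (string : String) (out : String) : Decidable (Spec_sinusoidal_string string out) := by unfold Spec_sinusoidal_string; infer_instance

-- ===== CLAIM (what is proved, stated in full; the proofs are below) =====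
def Claim_equal_sinusoidal_string : Prop := ∀ (string : String), Dom_sinusoidal_string string → Spec_sinusoidal_string string (sinusoidal_string string)

-- ===== LEMMAS AND PROOFS =====

-- appending-fold is map
theorem pv_foldl_push (g : Int → Char) (l : List Int) (a : List Char) :
    l.foldl (fun acc i => acc ++ [g i]) a = a ++ l.map g := by
  induction l generalizing a with
  | nil => simp
  | cons x t ih => simp [ih]

theorem pv_pyGetD_append_lt (cs : List Char) (c : Char) (i : Int) (d : Char)
    (h0 : 0 ≤ i) (h1 : i < (cs.length : Int)) :
    PySem.List.pyGetD (cs ++ [c]) i d = PySem.List.pyGetD cs i d := by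
  rw [PySem.List.pyGetD_eq_getElem (cs ++ [c]) d h0 (by simp; omega),
      PySem.List.pyGetD_eq_getElem cs d h0 h1]
  rw [List.getElem_append_left (by omega)]

theorem pv_pyGetD_append_self (cs : List Char) (c : Char) (d : Char) :
    PySem.List.pyGetD (cs ++ [c]) (cs.length : Int) d = c := by
  rw [PySem.List.pyGetD_eq_getElem (cs ++ [c]) d (by positivity) (by simp)]
  simp

-- range(a, m+1, s) = range(a, m, s) plus possibly m, for the three concrete (a, s) pairs of A
theorem pv_rstep1 (m : Nat) :
    PySem.List.pyRange 1 ((m : Int) + 1) 4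
      = PySem.List.pyRange 1 (m : Int) 4 ++ (if (m : Int) % 4 = 1 then [(m : Int)] else []) := by
  rw [PySem.List.pyRange_of_pos _ _ (by norm_num), PySem.List.pyRange_of_pos _ _ (by norm_num)]
  have c1 : (if (1 : Int) < (m : Int) + 1 then (((m : Int) + 1 - 1 + 4 - 1) / 4).toNat else 0)
      = (m + 3) / 4 := by split <;> omega
  have c0 : (if (1 : Int) < (m : Int) then (((m : Int) - 1 + 4 - 1) / 4).toNat else 0)
      = (m + 2) / 4 := by split <;> omega
  rw [c1, c0]
  by_cases h : (m : Int) % 4 = 1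
  · have e : (m + 3) / 4 = (m + 2) / 4 + 1 := by omega
    rw [e, List.range_succ, List.map_append, if_pos h]
    congr 1
    simp
    omega
  · have e : (m + 3) / 4 = (m + 2) / 4 := by omega
    rw [e, if_neg h, List.append_nil]

theorem pv_rstep2 (m : Nat) :
    PySem.List.pyRange 0 ((m : Int) + 1) 2
      = PySem.List.pyRange 0 (m : Int) 2 ++ (if (m : Int) % 2 = 0 then [(m : Int)] else []) := by
  rw [PySem.List.pyRange_of_pos _ _ (by norm_num), PySem.List.pyRange_of_pos _ _ (by norm_num)]
  have c1 : (if (0 : Int) < (m : Int) + 1 then (((m : Int) + 1 - 0 + 2 - 1) / 2).toNat else 0)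
      = (m + 2) / 2 := by split <;> omega
  have c0 : (if (0 : Int) < (m : Int) then (((m : Int) - 0 + 2 - 1) / 2).toNat else 0)
      = (m + 1) / 2 := by split <;> omega
  rw [c1, c0]
  by_cases h : (m : Int) % 2 = 0
  · have e : (m + 2) / 2 = (m + 1) / 2 + 1 := by omega
    rw [e, List.range_succ, List.map_append, if_pos h]
    congr 1
    simp
    omega
  · have e : (m + 2) / 2 = (m + 1) / 2 := by omega
    rw [e, if_neg h, List.append_nil]

theorem pv_rstep3 (m : Nat) :
    PySem.List.pyRange 3 ((m : Int) + 1) 4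
      = PySem.List.pyRange 3 (m : Int) 4 ++ (if (m : Int) % 4 = 3 then [(m : Int)] else []) := by
  rw [PySem.List.pyRange_of_pos _ _ (by norm_num), PySem.List.pyRange_of_pos _ _ (by norm_num)]
  have c1 : (if (3 : Int) < (m : Int) + 1 then (((m : Int) + 1 - 3 + 4 - 1) / 4).toNat else 0)
      = (m + 1) / 4 := by split <;> omega
  have c0 : (if (3 : Int) < (m : Int) then (((m : Int) - 3 + 4 - 1) / 4).toNat else 0)
      = m / 4 := by split <;> omega
  rw [c1, c0]
  by_cases h : (m : Int) % 4 = 3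
  · have e : (m + 1) / 4 = m / 4 + 1 := by omega
    rw [e, List.range_succ, List.map_append, if_pos h]
    congr 1
    simp
    omega
  · have e : (m + 1) / 4 = m / 4 := by omega
    rw [e, if_neg h, List.append_nil]

-- a map over a range of in-bounds indices ignores the appended element
theorem pv_map_getD_ext (cs : List Char) (c : Char) (a s : Int) (hs : 0 < s) (ha : 0 ≤ a) :
    (PySem.List.pyRange a (cs.length : Int) s).map (fun i => PySem.List.pyGetD (cs ++ [c]) i ' ')
      = (PySem.List.pyRange a (cs.length : Int) s).map (fun i => PySem.List.pyGetD cs i ' ') := by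
  apply List.map_congr_left
  intro i hi
  rw [PySem.List.mem_pyRange_iff_of_pos hs] at hi
  exact pv_pyGetD_append_lt cs c i ' ' (by omega) hi.2.1

-- the core invariant: A's three mapped ranges are exactly B's three buckets
theorem pv_master (cs : List Char) :
    (((PySem.List.pyRange 1 (cs.length : Int) 4).map (fun i => PySem.List.pyGetD cs i ' '),
      (PySem.List.pyRange 0 (cs.length : Int) 2).map (fun i => PySem.List.pyGetD cs i ' '),
      (PySem.List.pyRange 3 (cs.length : Int) 4).map (fun i => PySem.List.pyGetD cs i ' '))
      : List Char × List Char × List Char)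
    = (PySem.List.enumerate cs 0).foldl pvBStep ([], [], []) := by
  induction cs using List.reverseRecOn with
  | nil => decide
  | append_singleton cs c ih =>
    have hlen : (((cs ++ [c]).length : Int)) = (cs.length : Int) + 1 := by simp
    rw [hlen, pv_rstep1, pv_rstep2, pv_rstep3]
    rw [PySem.List.enumerate_append, List.foldl_append]
    have h1 := pv_map_getD_ext cs c 1 4 (by norm_num) (by norm_num)
    have h2 := pv_map_getD_ext cs c 0 2 (by norm_num) (by norm_num)
    have h3 := pv_map_getD_ext cs c 3 4 (by norm_num) (by norm_num)
    simp only [List.map_append, h1, h2, h3]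
    rw [show PySem.List.enumerate [c] (0 + (cs.length : Int)) = [((cs.length : Int), c)] by
      rw [PySem.List.enumerate_cons, PySem.List.enumerate_nil]; norm_num]
    rw [List.foldl_cons, List.foldl_nil, ← ih]
    have hself := pv_pyGetD_append_self cs c ' '
    have h4 : ((cs.length : Int)) % 4 = 0 ∨ ((cs.length : Int)) % 4 = 1
        ∨ ((cs.length : Int)) % 4 = 2 ∨ ((cs.length : Int)) % 4 = 3 := by omega
    rcases h4 with h | h | h | h
    · have e1 : ¬ ((cs.length : Int) % 4 = 1) := by omega
      have e2 : ((cs.length : Int) % 2 = 0) := by omega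
      have e3 : ¬ ((cs.length : Int) % 4 = 3) := by omega
      simp [pvBStep, e1, e2, e3, hself]
    · have e1 : ((cs.length : Int) % 4 = 1) := by omega
      have e2 : ((cs.length : Int) % 2 = 1) := by omega
      simp [pvBStep, e1, e2, hself]
    · have e1 : ¬ ((cs.length : Int) % 4 = 1) := by omega
      have e2 : ((cs.length : Int) % 2 = 0) := by omega
      have e3 : ¬ ((cs.length : Int) % 4 = 3) := by omega
      simp [pvBStep, e1, e2, e3, hself]
    · have e2 : ¬ ((cs.length : Int) % 2 = 0) := by omega
      have e3 : ((cs.length : Int) % 4 = 3) := by omega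
      simp [pvBStep, e2, e3, hself]

-- ===== VERDICT (by name: the statement is the Claim_ definition above) =====
theorem sinusoidal_string_spec : Claim_equal_sinusoidal_string := by
  intro s _
  unfold Spec_sinusoidal_string sinusoidal_string sinusoidal_string_alt
  simp only [pv_foldl_push]
  have h := pv_master s.toList
  have h1 := congrArg (fun t => t.1) h
  have h2 := congrArg (fun t => t.2.1) h
  have h3 := congrArg (fun t => t.2.2) h
  simp only at h1 h2 h3
  rw [List.nil_append, ← h1, ← h2, ← h3, List.append_assoc]
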